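-- pv_equiv track=rewrite | github.com/yuukanehiro/paiza | python/mondai/query_primer/query_primer__idle_group/main.py | get_result_list
-- ===== SOURCE A (Python) =====
-- from typing import List, Dict
--
-- def get_result_list(items: List[str], queries: List[str]) -> List[str]:
--     result = []
--
--     for q in queries:
--         q_array = q.split()
--         if q_array[0] == "leave":
--             items.remove(q_array[1])
--         elif q_array[0] == "join":
--             items.append(q_array[1])
--         elif q_array[0] == "handshake":
--             items.sort()
--             for v in items:
--                 result.append(v)
--
--     return result
-- ===== SOURCE B (Python) =====
-- from typing import List
--
--
-- def get_result_list(items: List[str], queries: List[str]) -> List[str]: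
--     # Represent the group as a multiset: a dict value -> count, built once.
--     # join/leave are O(1) count updates; a handshake sorts only the DISTINCT
--     # values and emits each one `count` times (a zero count emits nothing).
--     # Return-value equivalent to A; unlike A, this does not mutate `items`.
--     counts = {}
--     for v in items:
--         counts[v] = counts.get(v, 0) + 1
--     result = []
--     for q in queries:
--         parts = q.split()
--         if parts[0] == "leave":
--             counts[parts[1]] -= 1
--         elif parts[0] == "join":
--             v = parts[1]
--             counts[v] = counts.get(v, 0) + 1
--         elif parts[0] == "handshake":
--             for v in sorted(counts):
--                 result += [v] * counts[v]
--     return result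
-- ===== Notes on version B (the rewrite author's own statement) =====
-- stated objective: alternative
-- what changed: B replaces A's flat membership list (re-sorted in full on every handshake, linear remove on leave) by a value->count dictionary built once: join/leave are O(1) counter updates and a handshake sorts only the distinct values and emits each value count times, so duplicates are never re-sorted.
import Mathlib
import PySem

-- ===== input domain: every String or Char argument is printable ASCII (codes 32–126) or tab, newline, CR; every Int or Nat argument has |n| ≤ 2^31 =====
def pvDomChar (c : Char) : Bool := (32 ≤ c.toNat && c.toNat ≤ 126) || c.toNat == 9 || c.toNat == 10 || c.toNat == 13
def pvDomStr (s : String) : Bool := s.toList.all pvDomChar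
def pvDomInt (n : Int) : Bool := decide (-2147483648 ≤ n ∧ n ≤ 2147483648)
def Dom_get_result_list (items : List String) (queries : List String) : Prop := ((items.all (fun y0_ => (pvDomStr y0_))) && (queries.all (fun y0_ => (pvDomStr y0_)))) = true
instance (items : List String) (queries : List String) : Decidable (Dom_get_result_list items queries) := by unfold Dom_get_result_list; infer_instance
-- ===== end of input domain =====

-- B replaces A's flat list (full re-sort per handshake) by a value->count dictionary; a handshake
-- sorts only the distinct values. Equivalence is about the RETURN value only (A mutates `items`, B does not).

-- ===== PORT A =====
-- the for-loop over queries, carrying A's mutable state (items, result)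
def get_result_list_go : List String → List String → List String → List String
  | [], _items, result => result
  | q :: qs, items, result =>
    let q_array := PySem.Str.split₀ q
    match PySem.List.pyGet? q_array 0 with
    | none => get_result_list_go qs items result   -- Python raises IndexError here; excluded by Pre_
    | some op =>
      if op = "leave" then
        match PySem.List.pyGet? q_array 1 with
        | none => get_result_list_go qs items result  -- IndexError; excluded by Pre_
        | some v =>
          match PySem.List.remove? items v with
          | none => get_result_list_go qs items result  -- ValueError; excluded by Pre_
          | some items' => get_result_list_go qs items' result
      else if op = "join" then
        match PySem.List.pyGet? q_array 1 with
        | none => get_result_list_go qs items result  -- IndexError; excluded by Pre_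
        | some v => get_result_list_go qs (items ++ [v]) result
      else if op = "handshake" then
        let items' := PySem.List.sorted items (fun x => x) false
        get_result_list_go qs items' (items'.foldl (fun r v => r ++ [v]) result)
      else get_result_list_go qs items result

def get_result_list (items : List String) (queries : List String) : List String :=
  get_result_list_go queries items []

-- ===== PORT B =====
-- 'counts = {}; for v in items: counts[v] = counts.get(v, 0) + 1'
def bCounts (items : List String) : PySem.Dict String Int :=
  items.foldl (fun d x => d.insert x (d.getD x 0 + 1)) PySem.Dict.empty

-- 'for v in sorted(counts): result += [v] * counts[v]'
-- (v ranges over counts' keys, so counts[v] is exactly getD v 0 here)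
def bEmit (d : PySem.Dict String Int) (result : List String) : List String :=
  (PySem.List.sorted d.keys (fun x => x) false).foldl
    (fun r v => r ++ PySem.List.pyRepeat [v] (d.getD v 0)) result

-- one iteration of B's query loop on the state (counts, result)
def bStep (st : PySem.Dict String Int × List String) (q : String) :
    PySem.Dict String Int × List String :=
  let parts := PySem.Str.split₀ q
  match PySem.List.pyGet? parts 0 with
  | none => st           -- IndexError; excluded by Pre_
  | some op =>
    if op = "leave" then
      match PySem.List.pyGet? parts 1 with
      | none => st       -- IndexError; excluded by Pre_
      | some v =>
        match PySem.Dict.get? st.1 v with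
        | none => st     -- KeyError ('counts[v] -= 1' on a missing key); excluded by Pre_
        | some c => (st.1.insert v (c - 1), st.2)
    else if op = "join" then
      match PySem.List.pyGet? parts 1 with
      | none => st       -- IndexError; excluded by Pre_
      | some v => (st.1.insert v (st.1.getD v 0 + 1), st.2)
    else if op = "handshake" then (st.1, bEmit st.1 st.2)
    else st

def get_result_list_alt (items : List String) (queries : List String) : List String :=
  (queries.foldl bStep (bCounts items, [])).2

-- ===== PRECONDITION & SPEC =====
-- query q at position i is "leave v" / "join v"
def pvIsLeave (v q : String) : Bool :=
  ((PySem.Str.split₀ q).head? == some "leave") && ((PySem.Str.split₀ q)[1]? == some v)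
def pvIsJoin (v q : String) : Bool :=
  ((PySem.Str.split₀ q).head? == some "join") && ((PySem.Str.split₀ q)[1]? == some v)
def pvLeaves (v : String) (qs : List String) : Nat := qs.countP (pvIsLeave v)
def pvJoins (v : String) (qs : List String) : Nat := qs.countP (pvIsJoin v)

-- Pre_ excludes exactly the inputs where A raises: an empty/whitespace query (IndexError on
-- q.split()[0]), a "leave"/"join" query without a second token (IndexError), and a "leave v"
-- whose v is not in the group at that moment, stated by prefix counts (ValueError from remove).
def Pre_get_result_list (items : List String) (queries : List String) : Prop :=
  (∀ q ∈ queries, PySem.Str.split₀ q ≠ [] ∧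
     (((PySem.Str.split₀ q).head? = some "leave" ∨ (PySem.Str.split₀ q).head? = some "join") →
       2 ≤ (PySem.Str.split₀ q).length)) ∧
  (∀ i : Nat, ∀ _h : i < queries.length, ∀ v ∈ ((PySem.Str.split₀ (queries.getD i ""))[1]?).toList,
     (PySem.Str.split₀ (queries.getD i "")).head? = some "leave" →
     pvLeaves v (queries.take (i+1)) ≤ items.count v + pvJoins v (queries.take i))

instance (items : List String) (queries : List String) : Decidable (Pre_get_result_list items queries) := by
  unfold Pre_get_result_list; infer_instance

def pvWitness_get_result_list : List String × List String :=
  (["b", "a"], ["handshake", "join c", "leave b", "handshake"])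

def Spec_get_result_list (items : List String) (queries : List String) (out : List String) : Prop := out = get_result_list_alt items queries
instance (items : List String) (queries : List String) (out : List String) : Decidable (Spec_get_result_list items queries out) := by unfold Spec_get_result_list; infer_instance

-- ===== CLAIM (what is proved, stated in full; the proofs are below) =====
def Claim_equal_get_result_list : Prop := ∀ (items : List String) (queries : List String), Dom_get_result_list items queries → Pre_get_result_list items queries → Spec_get_result_list items queries (get_result_list items queries)

-- ===== LEMMAS AND PROOFS =====

-- B's loop invariant relating the counter dict to A's current list of members:
-- unique keys, every key counts its occurrences, and every member is a key
-- (a key may linger with count 0 after its last leave; it emits nothing).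
def pvInv (d : PySem.Dict String Int) (items : List String) : Prop :=
  d.keys.Nodup ∧ (∀ k, d.getD k 0 = (items.count k : Int)) ∧ (∀ k ∈ items, k ∈ d.keys)

lemma pvGet0_cons (a : String) (l : List String) :
    PySem.List.pyGet? (a :: l) (0 : Int) = some a := by
  simp [PySem.List.pyGet?, PySem.List.pyIdx?]

lemma pvGet1_cons (a b : String) (l : List String) :
    PySem.List.pyGet? (a :: b :: l) (1 : Int) = some b := by
  simp [PySem.List.pyGet?, PySem.List.pyIdx?]

-- a flatMap of replicates over a strictly increasing list is weakly increasing
lemma pvFlatRepl_pairwise (f : String → Nat) :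
    ∀ (L : List String), L.Pairwise (· < ·) →
      (L.flatMap (fun v => List.replicate (f v) v)).Pairwise (· ≤ ·) := by
  intro L
  induction L with
  | nil => intro _; simp
  | cons v L ih =>
    intro h
    rcases List.pairwise_cons.mp h with ⟨hv, hL⟩
    simp only [List.flatMap_cons]
    rw [List.pairwise_append]
    refine ⟨List.pairwise_replicate.mpr (Or.inr le_rfl), ih hL, ?_⟩
    intro a ha b hb
    obtain rfl := List.eq_of_mem_replicate ha
    rcases List.mem_flatMap.mp hb with ⟨u, hu, hbu⟩
    obtain rfl := List.eq_of_mem_replicate hbu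
    exact le_of_lt (hv _ hu)

-- occurrence count inside such a flatMap
lemma pvFlatRepl_count (f : String → Nat) (a : String) :
    ∀ (L : List String), L.Nodup →
      (L.flatMap (fun v => List.replicate (f v) v)).count a = if a ∈ L then f a else 0 := by
  intro L
  induction L with
  | nil => intro _; simp
  | cons v L ih =>
    intro h
    rcases List.nodup_cons.mp h with ⟨hv, hL⟩
    simp only [List.flatMap_cons, List.count_append, ih hL, List.count_replicate]
    by_cases hav : a = v
    · subst hav
      simp [hv]
    · simp [hav, Ne.symm hav]

-- the handshake: emitting each sorted distinct value `count` times IS the sorted member list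
lemma pvEmit_eq (d : PySem.Dict String Int) (items res : List String) (hinv : pvInv d items) :
    bEmit d res = res ++ PySem.List.sorted items (fun x => x) false := by
  obtain ⟨hnd, hcnt, hmem⟩ := hinv
  unfold bEmit
  rw [PySem.List.foldl_append_eq_flatMap]
  have hrepl : (fun v => PySem.List.pyRepeat [v] (d.getD v 0)) =
      (fun v => List.replicate (items.count v) v) := by
    funext v
    rw [PySem.List.pyRepeat_singleton, hcnt v]
    simp
  rw [hrepl]
  set L := PySem.List.sorted d.keys (fun x => x) false with hLdef
  have hLperm : L.Perm d.keys := PySem.List.sorted_perm d.keys (fun x => x) false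
  have hLnd : L.Nodup := (hLperm.nodup_iff).mpr hnd
  have hLle : L.Pairwise (· ≤ ·) := by
    simpa using PySem.List.sorted_pairwise d.keys (fun x => x)
  have hLlt : L.Pairwise (· < ·) := by
    have h2 : L.Pairwise (fun a b => a ≤ b ∧ a ≠ b) := hLle.and hLnd
    exact h2.imp (fun h => lt_of_le_of_ne h.1 h.2)
  have hpair := pvFlatRepl_pairwise (fun v => items.count v) L hLlt
  have hperm : (L.flatMap (fun v => List.replicate (items.count v) v)).Perm items := by
    rw [List.perm_iff_count]
    intro a
    rw [pvFlatRepl_count (fun v => items.count v) a L hLnd]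
    by_cases haL : a ∈ L
    · simp [haL]
    · have : a ∉ items := fun hai => haL (hLperm.mem_iff.mpr (hmem a hai))
      simp [haL, List.count_eq_zero_of_not_mem this]
  rw [PySem.List.sorted_id_eq_of_perm_of_pairwise items _ hperm hpair]

-- the invariant holds for the dict B builds from `items`
lemma pvInv_bCounts (items : List String) : pvInv (bCounts items) items := by
  refine ⟨?_, ?_, ?_⟩
  · exact PySem.Dict.nodup_keys_foldl_insert items _ _ PySem.Dict.nodup_keys_empty
  · intro k
    rw [bCounts, PySem.Dict.getD_foldl_insert_add_one]
    simp [PySem.Dict.getD_empty]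
  · intro k hk
    rw [bCounts, PySem.Dict.keys_foldl_insert]
    simp only [PySem.Dict.keys_empty, PySem.Set.update_nil_left]
    exact (PySem.Set.mem_ofList _ _).mpr hk

-- main loop: A's recursion over queries equals B's foldl, under the invariant
lemma go_eq : ∀ (qs items : List String) (d : PySem.Dict String Int) (res : List String),
    pvInv d items →
    (∀ q ∈ qs, PySem.Str.split₀ q ≠ [] ∧
       (((PySem.Str.split₀ q).head? = some "leave" ∨ (PySem.Str.split₀ q).head? = some "join") →
         2 ≤ (PySem.Str.split₀ q).length)) →
    (∀ i : Nat, ∀ _h : i < qs.length, ∀ v ∈ ((PySem.Str.split₀ (qs.getD i ""))[1]?).toList,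
       (PySem.Str.split₀ (qs.getD i "")).head? = some "leave" →
       pvLeaves v (qs.take (i+1)) ≤ items.count v + pvJoins v (qs.take i)) →
    get_result_list_go qs items res = (qs.foldl bStep (d, res)).2 := by
  intro qs
  induction qs with
  | nil => intro items d res _ _ _; rfl
  | cons q qs ih =>
    intro items d res hinv htok hcnt
    obtain ⟨hne, hlen⟩ := htok q (List.mem_cons_self ..)
    obtain ⟨op, rest, hq⟩ : ∃ op rest, PySem.Str.split₀ q = op :: rest := by
      cases h : PySem.Str.split₀ q with
      | nil => exact absurd h hne
      | cons a l => exact ⟨a, l, rfl⟩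
    have htok' : ∀ p ∈ qs, PySem.Str.split₀ p ≠ [] ∧
        (((PySem.Str.split₀ p).head? = some "leave" ∨ (PySem.Str.split₀ p).head? = some "join") →
          2 ≤ (PySem.Str.split₀ p).length) :=
      fun p hp => htok p (List.mem_cons_of_mem _ hp)
    obtain ⟨hnd, hgd, hkm⟩ := hinv
    simp only [List.foldl_cons, get_result_list_go, bStep, hq, pvGet0_cons]
    by_cases hop1 : op = "leave"
    · subst hop1
      have h2 : 2 ≤ (PySem.Str.split₀ q).length := hlen (Or.inl (by rw [hq]; rfl))
      obtain ⟨v, rest', hrest⟩ : ∃ v rest', rest = v :: rest' := by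
        rw [hq] at h2
        cases rest with
        | nil => simp at h2
        | cons a l => exact ⟨a, l, rfl⟩
      subst hrest
      have hmem : v ∈ items := by
        have h0 := hcnt 0 (by simp) v (by simp [hq]) (by simp [hq])
        have hl1 : pvLeaves v ((q :: qs).take 1) = 1 := by
          simp [pvLeaves, pvIsLeave, hq]
        rw [hl1] at h0
        simp only [List.take_zero, pvJoins, List.countP_nil, Nat.add_zero] at h0
        exact List.count_pos_iff.mp (Nat.lt_of_lt_of_le Nat.zero_lt_one h0)
      have hcpos : 0 < items.count v := List.count_pos_iff.mpr hmem
      have hvk : v ∈ d.keys := hkm v hmem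
      have hsome : PySem.Dict.get? d v = some ((items.count v : Int)) := by
        have hcon : d.contains v = true := (PySem.Dict.contains_iff_mem_keys ..).mpr hvk
        have hiss : (PySem.Dict.get? d v).isSome := by
          rw [← PySem.Dict.contains_eq_isSome_get?]; exact hcon
        obtain ⟨c, hc⟩ := Option.isSome_iff_exists.mp hiss
        have := hgd v
        rw [PySem.Dict.getD_eq_get?_getD, hc] at this
        simp at this
        rw [hc, this]
      simp only [reduceIte, pvGet1_cons, hsome]
      rw [PySem.List.remove?_eq_some_erase items v hmem]
      simp only []
      refine ih (items.erase v) (d.insert v ((items.count v : Int) - 1)) res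
        ⟨PySem.Dict.nodup_keys_insert _ _ _ hnd, ?_, ?_⟩
        htok' ?_
      · intro k
        rw [PySem.Dict.getD_insert]
        by_cases hkv : k = v
        · subst hkv
          rw [List.count_erase_self]
          simp
          omega
        · rw [List.count_erase_of_ne hkv]
          simp [hkv, hgd k]
      · intro k hk
        have : k ∈ items := List.mem_of_mem_erase hk
        exact (PySem.Dict.mem_keys_insert ..).mpr (Or.inr (hkm k this))
      · intro i hi v' hv' hlv'
        have hstep := hcnt (i+1) (by simpa using Nat.succ_lt_succ hi) v' (by simpa using hv') (by simpa using hlv')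
        simp only [List.take_succ_cons] at hstep
        have hnj : pvIsJoin v' q = false := by
          simp [pvIsJoin, hq]
        have hLq : pvLeaves v' (q :: qs.take (i+1)) =
            (if v' = v then 1 else 0) + pvLeaves v' (qs.take (i+1)) := by
          simp only [pvLeaves, List.countP_cons]
          by_cases hvv : v' = v
          · simp [pvIsLeave, hq, hvv, Nat.add_comm]
          · simp [pvIsLeave, hq, hvv, Ne.symm hvv]
        have hJq : pvJoins v' (q :: qs.take i) = pvJoins v' (qs.take i) := by
          simp [pvJoins, hnj]
        rw [hLq, hJq] at hstep
        by_cases hvv : v' = v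
        · subst hvv
          rw [List.count_erase_self]
          simp at hstep
          omega
        · rw [List.count_erase_of_ne hvv]
          simp only [if_neg hvv] at hstep
          omega
    · by_cases hop2 : op = "join"
      · subst hop2
        have h2 : 2 ≤ (PySem.Str.split₀ q).length := hlen (Or.inr (by rw [hq]; rfl))
        obtain ⟨v, rest', hrest⟩ : ∃ v rest', rest = v :: rest' := by
          rw [hq] at h2
          cases rest with
          | nil => simp at h2
          | cons a l => exact ⟨a, l, rfl⟩
        subst hrest
        simp only [reduceIte, pvGet1_cons]
        refine ih (items ++ [v]) (d.insert v (d.getD v 0 + 1)) res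
          ⟨PySem.Dict.nodup_keys_insert _ _ _ hnd, ?_, ?_⟩
          htok' ?_
        · intro k
          rw [PySem.Dict.getD_insert, List.count_append]
          by_cases hkv : k = v
          · subst hkv
            simp [hgd k]
          · simp [hkv, hgd k, Ne.symm]
        · intro k hk
          rcases List.mem_append.mp hk with hk' | hk'
          · exact (PySem.Dict.mem_keys_insert ..).mpr (Or.inr (hkm k hk'))
          · simp at hk'
            exact (PySem.Dict.mem_keys_insert ..).mpr (Or.inl hk')
        · intro i hi v' hv' hlv'
          have hstep := hcnt (i+1) (by simpa using Nat.succ_lt_succ hi) v' (by simpa using hv') (by simpa using hlv')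
          simp only [List.take_succ_cons] at hstep
          have hLq : pvLeaves v' (q :: qs.take (i+1)) = pvLeaves v' (qs.take (i+1)) := by
            simp [pvLeaves, pvIsLeave, hq]
          have hJq : pvJoins v' (q :: qs.take i) =
              (if v' = v then 1 else 0) + pvJoins v' (qs.take i) := by
            simp only [pvJoins, List.countP_cons]
            by_cases hvv : v' = v
            · simp [pvIsJoin, hq, hvv, Nat.add_comm]
            · simp [pvIsJoin, hq, hvv, Ne.symm hvv]
          rw [hLq, hJq] at hstep
          have hcapp : (items ++ [v]).count v' = items.count v' + (if v' = v then 1 else 0) := by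
            by_cases hvv : v' = v
            · simp [hvv, List.count_append]
            · simp [List.count_append, hvv, Ne.symm hvv]
          rw [hcapp]
          omega
      · by_cases hop3 : op = "handshake"
        · subst hop3
          simp only [reduceIte]
          rw [PySem.List.foldl_append_singleton_eq_self,
              pvEmit_eq d items res ⟨hnd, hgd, hkm⟩]
          have hperm : (PySem.List.sorted items (fun x => x) false).Perm items :=
            PySem.List.sorted_perm items (fun x => x) false
          refine ih (PySem.List.sorted items (fun x => x) false) d
            (res ++ PySem.List.sorted items (fun x => x) false)
            ⟨hnd, ?_, ?_⟩ htok' ?_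
          · intro k; rw [hgd k, hperm.count_eq k]
          · intro k hk; exact hkm k (hperm.mem_iff.mp hk)
          · intro i hi v' hv' hlv'
            have hstep := hcnt (i+1) (by simpa using Nat.succ_lt_succ hi) v' (by simpa using hv') (by simpa using hlv')
            simp only [List.take_succ_cons] at hstep
            have hLq : pvLeaves v' (q :: qs.take (i+1)) = pvLeaves v' (qs.take (i+1)) := by
              simp [pvLeaves, pvIsLeave, hq]
            have hJq : pvJoins v' (q :: qs.take i) = pvJoins v' (qs.take i) := by
              simp [pvJoins, pvIsJoin, hq]
            rw [hLq, hJq] at hstep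
            rw [hperm.count_eq v']
            exact hstep
        · simp only [if_neg hop1, if_neg hop2, if_neg hop3]
          refine ih items d res ⟨hnd, hgd, hkm⟩ htok' ?_
          intro i hi v' hv' hlv'
          have hstep := hcnt (i+1) (by simpa using Nat.succ_lt_succ hi) v' (by simpa using hv') (by simpa using hlv')
          simp only [List.take_succ_cons] at hstep
          have hLq : pvLeaves v' (q :: qs.take (i+1)) = pvLeaves v' (qs.take (i+1)) := by
            simp [pvLeaves, pvIsLeave, hq, hop1]
          have hJq : pvJoins v' (q :: qs.take i) = pvJoins v' (qs.take i) := by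
            simp [pvJoins, pvIsJoin, hq, hop2]
          rw [hLq, hJq] at hstep
          exact hstep

-- ===== VERDICT (by name: the statement is the Claim_ definition above) =====
theorem get_result_list_spec : Claim_equal_get_result_list := by
  intro items queries _hdom hpre
  unfold Spec_get_result_list get_result_list get_result_list_alt
  exact go_eq queries items (bCounts items) [] (pvInv_bCounts items) hpre.1 hpre.2
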